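-- pv_equiv track=rewrite | github.com/anna-hope/pylexemes | reconstructor.py | assemble_groups
-- ===== SOURCE A (Python) =====
-- def assemble_groups(forms, avglength):
-- 	s_groups = []
-- 	p_count = 0
-- 	while p_count < avglength:
-- 		cur_group = []
-- 		# for symbols that have already occured
-- 		sg = []
-- 		for f in forms:
-- 			try:
-- 				sg.append(f[p_count])
-- 				cur_group.append(f[p_count])
-- 			except IndexError:
-- 				# cur_group.append('-')
-- 				continue
-- 		s_groups.append(cur_group)
-- 		# symbol_groups.append(sg)
-- 		p_count += 1
-- 	return s_groups
-- ===== SOURCE B (Python) =====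
-- def assemble_groups(forms, avglength):
-- 	# Alternative decomposition: pre-allocate one bucket per position and scatter
-- 	# each form's symbols into its buckets in a single pass over the forms
-- 	# (loop interchange; bounds checked with min instead of try/except).
-- 	s_groups = [[] for _ in range(avglength)]
-- 	for f in forms:
-- 		for p in range(min(len(f), avglength)):
-- 			s_groups[p].append(f[p])
-- 	return s_groups
-- ===== Notes on version B (the rewrite author's own statement) =====
-- stated objective: faster
-- what changed: B pre-allocates the per-position buckets and makes a single forms-major pass scattering each symbol into its bucket (loop interchange, bounds via min), instead of A's position-major while loop that rescans every form at every position under try/except.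
import Mathlib
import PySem

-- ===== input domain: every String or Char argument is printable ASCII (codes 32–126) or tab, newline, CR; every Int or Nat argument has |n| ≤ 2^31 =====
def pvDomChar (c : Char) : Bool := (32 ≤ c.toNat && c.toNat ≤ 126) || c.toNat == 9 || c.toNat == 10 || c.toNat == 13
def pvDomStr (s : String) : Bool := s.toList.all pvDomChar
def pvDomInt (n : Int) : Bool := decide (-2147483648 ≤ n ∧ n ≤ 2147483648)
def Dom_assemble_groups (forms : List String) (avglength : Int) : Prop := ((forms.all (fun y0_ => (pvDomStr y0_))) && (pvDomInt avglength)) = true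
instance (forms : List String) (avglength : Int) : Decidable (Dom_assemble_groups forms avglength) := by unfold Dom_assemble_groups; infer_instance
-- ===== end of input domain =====

-- B scatters each form's symbols into pre-allocated per-position buckets in one
-- forms-major pass (loop interchange, touching only valid (form, position) pairs)
-- instead of A's position-major rescan of every form at every position (faster).

-- ===== PORT A =====
-- inner 'for f in forms' loop: state (sg, cur_group); f[p_count] raising IndexError = pyGet? returning none → continue
def assemble_groups_inner (forms : List String) (p_count : Int) : List String × List String :=
  forms.foldl (fun st f =>
    match PySem.Str.pyGet? f p_count with
    | some c => (st.1 ++ [String.ofList [c]], st.2 ++ [String.ofList [c]])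
    | none => st) ([], [])

-- the 'while p_count < avglength' loop
def assemble_groups_loop (forms : List String) (avglength p_count : Int) (s_groups : List (List String)) : List (List String) :=
  if p_count < avglength then
    assemble_groups_loop forms avglength (p_count + 1) (s_groups ++ [(assemble_groups_inner forms p_count).2])
  else s_groups
termination_by (avglength - p_count).toNat
decreasing_by omega

def assemble_groups (forms : List String) (avglength : Int) : List (List String) :=
  assemble_groups_loop forms avglength 0 []

-- ===== PORT B =====
-- inner 'for p in range(min(len(f), avglength))' loop of Source B; s_groups[p].append(f[p]).
-- getD's default ' ' is unreachable: p < len(f) throughout the range.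
def scatter_form (avglength : Int) (gs : List (List String)) (f : String) : List (List String) :=
  (List.range (min f.toList.length avglength.toNat)).foldl
    (fun l p => l.modify p (fun col => col ++ [String.ofList [f.toList.getD p ' ']])) gs

def assemble_groups_alt (forms : List String) (avglength : Int) : List (List String) :=
  forms.foldl (scatter_form avglength) (List.replicate avglength.toNat [])

-- ===== PRECONDITION & SPEC =====
def Spec_assemble_groups (forms : List String) (avglength : Int) (out : List (List String)) : Prop := out = assemble_groups_alt forms avglength
instance (forms : List String) (avglength : Int) (out : List (List String)) : Decidable (Spec_assemble_groups forms avglength out) := by unfold Spec_assemble_groups; infer_instance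

-- ===== CLAIM (what is proved, stated in full; the proofs are below) =====
def Claim_equal_assemble_groups : Prop := ∀ (forms : List String) (avglength : Int), Dom_assemble_groups forms avglength → Spec_assemble_groups forms avglength (assemble_groups forms avglength)

-- ===== LEMMAS AND PROOFS =====

-- the column at position p: the symbols f[p] of the forms long enough to have one
def pvColAt (forms : List String) (p : Int) : List String :=
  forms.filterMap (fun f => (PySem.Str.pyGet? f p).map (fun c => String.ofList [c]))

theorem pv_inner_foldl (p : Int) (forms : List String) : ∀ (st : List String × List String),
    (forms.foldl (fun st f =>
      match PySem.Str.pyGet? f p with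
      | some c => (st.1 ++ [String.ofList [c]], st.2 ++ [String.ofList [c]])
      | none => st) st).2 = st.2 ++ pvColAt forms p := by
  induction forms with
  | nil => intro st; simp [pvColAt]
  | cons f fs ih =>
      intro st
      cases h : PySem.Str.pyGet? f p <;>
        simp only [List.foldl_cons, h, ih, pvColAt, List.filterMap_cons, Option.map_none,
          Option.map_some, List.append_assoc, List.singleton_append]

theorem pv_inner_eq (forms : List String) (p : Int) :
    (assemble_groups_inner forms p).2 = pvColAt forms p := by
  simpa using pv_inner_foldl p forms ([], [])

theorem pv_loop_eq (forms : List String) (n : Int) :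
    ∀ (fuel : Nat) (p : Int) (acc : List (List String)), (n - p).toNat = fuel →
      assemble_groups_loop forms n p acc
        = acc ++ (List.range (n - p).toNat).map (fun i : Nat => pvColAt forms (p + (i : Int))) := by
  intro fuel
  induction fuel with
  | zero =>
      intro p acc h
      rw [assemble_groups_loop]
      rw [if_neg (by omega), h]
      simp
  | succ k ih =>
      intro p acc h
      rw [assemble_groups_loop, if_pos (by omega)]
      rw [ih (p + 1) _ (by omega)]
      rw [pv_inner_eq, h]
      have h2 : (n - (p + 1)).toNat = k := by omega
      rw [h2, List.range_succ_eq_map]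
      simp only [List.map_cons, List.map_map]
      rw [List.append_assoc]
      congr 1
      simp only [List.singleton_append, Function.comp_def]
      congr 1
      · congr 1
        push_cast
        ring
      · apply List.map_congr_left
        intro i _
        congr 1
        push_cast
        ring

theorem pv_A_eq (forms : List String) (n : Int) :
    assemble_groups forms n = (List.range n.toNat).map (fun i : Nat => pvColAt forms (i : Int)) := by
  rw [assemble_groups, pv_loop_eq forms n _ 0 [] rfl]
  simp

theorem pv_foldl_range_modify {α : Type} (g : Nat → α → α) :
    ∀ (m : Nat) (gs : List α) (q : Nat),
      ((List.range m).foldl (fun l p => l.modify p (g p)) gs)[q]?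
        = if q < m then gs[q]?.map (g q) else gs[q]? := by
  intro m
  induction m with
  | zero => intro gs q; simp
  | succ k ih =>
      intro gs q
      rw [List.range_succ, List.foldl_append]
      simp only [List.foldl_cons, List.foldl_nil]
      by_cases hqk : q = k
      · subst hqk
        rw [List.getElem?_modify_eq, ih]
        rw [if_neg (by omega), if_pos (by omega)]
        cases gs[q]? <;> simp
      · rw [List.getElem?_modify_ne _ _ (fun h => hqk h.symm), ih]
        split_ifs with h1 h2 h2 <;> first | rfl | omega

theorem pv_scatter_getElem? (n : Int) (f : String) (gs : List (List String)) (q : Nat) :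
    (scatter_form n gs f)[q]?
      = if q < min f.toList.length n.toNat
          then gs[q]?.map (· ++ [String.ofList [f.toList.getD q ' ']])
          else gs[q]? := by
  exact pv_foldl_range_modify (fun p col => col ++ [String.ofList [f.toList.getD p ' ']]) _ gs q

def pvEntry (f : String) (q : Nat) : Option String :=
  if q < f.toList.length then some (String.ofList [f.toList.getD q ' ']) else none

theorem pv_colAt_natCast (forms : List String) (q : Nat) :
    pvColAt forms (q : Int) = forms.filterMap (fun f => pvEntry f q) := by
  unfold pvColAt
  apply List.filterMap_congr
  intro f _
  simp only [PySem.Str.pyGet?_natCast, pvEntry]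
  by_cases h : q < f.toList.length
  · rw [List.getElem?_eq_getElem h, if_pos h]
    simp [List.getD, List.getElem?_eq_getElem h]
  · rw [List.getElem?_eq_none (by omega), if_neg h]
    rfl

theorem pv_B_getElem? (n : Int) : ∀ (forms : List String) (gs : List (List String)) (q : Nat),
    (forms.foldl (scatter_form n) gs)[q]?
      = if q < n.toNat
          then gs[q]?.map (· ++ forms.filterMap (fun f => pvEntry f q))
          else gs[q]? := by
  intro forms
  induction forms with
  | nil =>
      intro gs q
      simp only [List.foldl_nil, List.filterMap_nil]
      split_ifs
      · cases gs[q]? <;> simp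
      · rfl
  | cons f fs ih =>
      intro gs q
      rw [List.foldl_cons, ih, List.filterMap_cons]
      by_cases hn : q < n.toNat
      · rw [if_pos hn, if_pos hn, pv_scatter_getElem?]
        by_cases hf : q < f.toList.length
        · rw [if_pos (by omega)]
          unfold pvEntry
          rw [if_pos hf]
          cases gs[q]? <;> simp
        · rw [if_neg (by omega)]
          unfold pvEntry
          rw [if_neg hf]
      · rw [if_neg hn, if_neg hn, pv_scatter_getElem?, if_neg (by omega)]

-- ===== VERDICT (by name: the statement is the Claim_ definition above) =====
theorem assemble_groups_spec : Claim_equal_assemble_groups := by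
  intro forms avglength _
  unfold Spec_assemble_groups
  rw [pv_A_eq]
  apply List.ext_getElem?
  intro q
  rw [assemble_groups_alt, pv_B_getElem?,
    List.getElem?_map]
  by_cases h : q < avglength.toNat
  · rw [List.getElem?_range h, if_pos h, List.getElem?_replicate, if_pos h]
    simp [pv_colAt_natCast]
  · rw [if_neg h, List.getElem?_replicate, if_neg h,
      List.getElem?_eq_none (by simpa using h)]
    rfl
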